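-- pv_equiv track=rewrite | github.com/Gururazer/Daily_dsa | DAY-43/Day 43 - Find the Minimum Amount of Time to Brew Potions.py | minTimeToBrewPotions
-- ===== SOURCE A (Python) =====
-- def minTimeToBrewPotions(skill, mana):
--     n, m = len(skill), len(mana)
--     avail = [0] * n
--
--     for j in range(m):
--
--         offsets = [0] * (n + 1)
--         for i in range(n):
--             offsets[i+1] = offsets[i] + skill[i] * mana[j]
--
--
--         t = max(avail[i] - offsets[i] for i in range(n))
--         if t < 0:
--             t = 0
--
--
--         for i in range(n):
--             avail[i] = t + offsets[i+1]
--
--     return avail[-1]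
-- ===== SOURCE B (Python) =====
-- def minTimeToBrewPotions(skill, mana):
--     n = len(skill)
--     done = [0] * n
--     for x in mana:
--         cur = max(done[0], 0)
--         for s, d in zip(skill[:-1], done[1:]):
--             cur = max(cur + s * x, d)
--         done[n - 1] = cur + skill[n - 1] * x
--         for i in range(n - 2, -1, -1):
--             done[i] = done[i + 1] - skill[i + 1] * x
--     return done[n - 1]
-- ===== Notes on version B (the rewrite author's own statement) =====
-- stated objective: alternative
-- what changed: Replaces A's per-potion prefix-offsets array plus explicit max-over-offsets construction with a forward scalar sweep computing the last wizard's finish time directly and a backward back-fill of completion times.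
import Mathlib
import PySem

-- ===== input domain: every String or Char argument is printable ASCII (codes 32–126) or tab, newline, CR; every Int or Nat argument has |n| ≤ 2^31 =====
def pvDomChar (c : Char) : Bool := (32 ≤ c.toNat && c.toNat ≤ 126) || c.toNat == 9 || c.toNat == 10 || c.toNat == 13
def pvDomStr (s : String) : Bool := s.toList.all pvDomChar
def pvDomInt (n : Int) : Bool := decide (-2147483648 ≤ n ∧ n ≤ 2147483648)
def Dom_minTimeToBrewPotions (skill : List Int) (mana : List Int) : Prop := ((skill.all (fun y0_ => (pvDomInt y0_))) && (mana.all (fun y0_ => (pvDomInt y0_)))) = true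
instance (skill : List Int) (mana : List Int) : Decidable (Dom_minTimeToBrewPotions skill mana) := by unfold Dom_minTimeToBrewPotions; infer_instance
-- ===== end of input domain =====

-- B replaces A's per-potion offsets array + max-over-offsets step by a forward scalar
-- sweep for the last wizard's finish time and a backward back-fill (objective: alternative).

-- ===== PORT A =====
-- offsets loop: offsets[0] = acc start; offsets[i+1] = offsets[i] + skill[i]*mj, built left to right
def pvOffsets (mj : Int) (acc : Int) : List Int → List Int
  | [] => [acc]
  | s :: rest => acc :: pvOffsets mj (acc + s * mj) rest

def minTimeToBrewPotions (skill : List Int) (mana : List Int) : Int :=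
  let n := skill.length
  let avail := mana.foldl (fun avail mj =>
    let offsets := pvOffsets mj 0 skill
    -- t = max(avail[i] - offsets[i] for i in range(n)) : max over the n pairs
    let t := (PySem.List.max? (List.zipWith (fun a o => a - o) avail offsets) (fun y => y)).getD 0
    let t := if t < 0 then 0 else t
    -- for i in range(n): avail[i] = t + offsets[i+1]
    (offsets.drop 1).map (fun o => t + o)) (List.replicate n 0)
  (PySem.List.pyGet? avail (-1)).getD 0

-- ===== PORT B =====
-- backward loop 'for i in range(n-2,-1,-1): done[i] = done[i+1] - skill[i+1]*x'
-- built back-to-front: pvBackfill x fin (skill[1:]) writes each cell once, last cell = fin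
def pvBackfill (x : Int) (fin : Int) : List Int → List Int
  | [] => [fin]
  | s :: rest =>
    let t := pvBackfill x fin rest
    (t.headD 0 - s * x) :: t

def minTimeToBrewPotions_alt (skill : List Int) (mana : List Int) : Int :=
  let n := skill.length
  let done := mana.foldl (fun done x =>
    let cur := (List.zip skill.dropLast (done.drop 1)).foldl
      (fun cur sd => max (cur + sd.1 * x) sd.2) (max (done.headD 0) 0)
    let fin := cur + (PySem.List.pyGet? skill (-1)).getD 0 * x
    pvBackfill x fin (skill.drop 1)) (List.replicate n 0)
  (PySem.List.pyGet? done (-1)).getD 0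

-- ===== PRECONDITION & SPEC =====
-- Pre_ excludes only empty skill, where A raises (ValueError from max() of an empty
-- generator when mana ≠ [], IndexError from avail[-1] when mana = []).
def Pre_minTimeToBrewPotions (skill : List Int) (mana : List Int) : Prop := skill ≠ []
instance (skill : List Int) (mana : List Int) : Decidable (Pre_minTimeToBrewPotions skill mana) := by unfold Pre_minTimeToBrewPotions; infer_instance

def pvWitness_minTimeToBrewPotions : List Int × List Int := ([1, 5, 2, 4], [5, 1, 4, 2])

def Spec_minTimeToBrewPotions (skill : List Int) (mana : List Int) (out : Int) : Prop := out = minTimeToBrewPotions_alt skill mana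
instance (skill : List Int) (mana : List Int) (out : Int) : Decidable (Spec_minTimeToBrewPotions skill mana out) := by unfold Spec_minTimeToBrewPotions; infer_instance

-- ===== CLAIM (what is proved, stated in full; the proofs are below) =====
def Claim_equal_minTimeToBrewPotions : Prop := ∀ (skill : List Int) (mana : List Int), Dom_minTimeToBrewPotions skill mana → Pre_minTimeToBrewPotions skill mana → Spec_minTimeToBrewPotions skill mana (minTimeToBrewPotions skill mana)

-- ===== LEMMAS AND PROOFS =====

theorem pvBackfill_head (x fin : Int) (l : List Int) :
    (pvBackfill x fin l).headD 0 = fin - l.sum * x := by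
  induction l with
  | nil => simp [pvBackfill]
  | cons s rest ih =>
    simp only [pvBackfill, List.headD_cons, List.sum_cons]
    rw [ih]; ring

theorem pvBackfill_length (x fin : Int) (l : List Int) :
    (pvBackfill x fin l).length = l.length + 1 := by
  induction l with
  | nil => rfl
  | cons s rest ih => simp [pvBackfill, ih]

-- A's write-back list equals the back-filled list with the last wizard's finish time
theorem map_offsets_eq_backfill (mj t b : Int) (rest : List Int) :
    (pvOffsets mj b rest).map (fun o => t + o)
      = pvBackfill mj (t + b + rest.sum * mj) rest := by
  induction rest generalizing b with
  | nil => simp [pvOffsets, pvBackfill]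
  | cons s r ih =>
    simp only [pvOffsets, List.map_cons]
    rw [ih (b + s * mj)]
    have hF : t + b + (s :: r).sum * mj = t + (b + s * mj) + r.sum * mj := by
      simp only [List.sum_cons]; ring
    rw [hF]
    simp only [pvBackfill, pvBackfill_head]
    congr 1
    ring

-- hoisting a max through a running max fold
theorem foldl_max_max (l : List Int) (x y : Int) :
    l.foldl max (max x y) = max x (l.foldl max y) := by
  induction l generalizing y with
  | nil => rfl
  | cons a t ih =>
    simp only [List.foldl_cons]
    rw [max_assoc, ih]

-- the forward sweep computes  (running max of (avail[k] - offsets[k])) + total offset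
theorem forward_sweep (mj : Int) (skill : List Int) (hne : skill ≠ []) :
    ∀ (arest : List Int), arest.length + 1 = skill.length → ∀ (c a : Int),
    (List.zip skill.dropLast arest).foldl (fun cur sd => max (cur + sd.1 * mj) sd.2) c
        + (PySem.List.pyGet? skill (-1)).getD 0 * mj
      = (List.zipWith (fun d o => d - o) arest ((pvOffsets mj a skill).drop 1)).foldl max (c - a)
        + a + skill.sum * mj := by
  induction skill with
  | nil => exact absurd rfl hne
  | cons s rest ih =>
    intro arest hlen c a
    cases rest with
    | nil =>
      cases arest with
      | nil =>
        simp [pvOffsets, PySem.List.pyGet?_neg_one]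
      | cons _ _ => simp at hlen
    | cons s1 r1 =>
      cases arest with
      | nil => simp at hlen
      | cons a1 ar =>
        have hne' : (s1 :: r1) ≠ [] := by simp
        have hlen' : ar.length + 1 = (s1 :: r1).length := by
          simp only [List.length_cons] at hlen ⊢; omega
        have hdl : (s :: s1 :: r1).dropLast = s :: (s1 :: r1).dropLast := rfl
        have hlast : PySem.List.pyGet? (s :: s1 :: r1) (-1)
            = PySem.List.pyGet? (s1 :: r1) (-1) := by
          rw [PySem.List.pyGet?_neg_one, PySem.List.pyGet?_neg_one]
          rfl
        rw [hdl, List.zip_cons_cons, List.foldl_cons, hlast]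
        rw [ih hne' ar hlen' (max (c + s * mj) a1) (a + s * mj)]
        have hoff : (pvOffsets mj a (s :: s1 :: r1)).drop 1
            = pvOffsets mj (a + s * mj) (s1 :: r1) := rfl
        rw [hoff]
        have hoff2 : pvOffsets mj (a + s * mj) (s1 :: r1)
            = (a + s * mj) :: (pvOffsets mj (a + s * mj) (s1 :: r1)).drop 1 := rfl
        conv_rhs => rw [hoff2]
        rw [List.zipWith_cons_cons, List.foldl_cons]
        have h1 : max (c + s * mj) a1 - (a + s * mj) = max (c - a) (a1 - (a + s * mj)) := by
          rw [← max_sub_sub_right]; congr 1; ring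
        rw [h1]
        have hsum : (s :: s1 :: r1).sum = s + (s1 :: r1).sum := by simp
        rw [hsum]; ring_nf

-- one potion: A's step function equals B's step function on states of the right length
theorem step_eq (skill : List Int) (hne : skill ≠ []) (mj : Int) (avail : List Int)
    (hlen : avail.length = skill.length) :
    (let offsets := pvOffsets mj 0 skill
     let t := (PySem.List.max? (List.zipWith (fun a o => a - o) avail offsets) (fun y => y)).getD 0
     let t := if t < 0 then 0 else t
     (offsets.drop 1).map (fun o => t + o))
    = (let cur := (List.zip skill.dropLast (avail.drop 1)).foldl
        (fun cur sd => max (cur + sd.1 * mj) sd.2) (max (avail.headD 0) 0)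
       let fin := cur + (PySem.List.pyGet? skill (-1)).getD 0 * mj
       pvBackfill mj fin (skill.drop 1)) := by
  cases skill with
  | nil => exact absurd rfl hne
  | cons s0 srest =>
    cases avail with
    | nil => simp at hlen
    | cons a0 arest =>
      simp only []
      -- unfold the head of the offsets list
      have hoffs : pvOffsets mj 0 (s0 :: srest) = 0 :: pvOffsets mj (0 + s0 * mj) srest := rfl
      -- A's t
      rw [hoffs, List.zipWith_cons_cons, PySem.List.max?_id_cons]
      simp only [Option.getD_some]
      have hdrop1 : (0 :: pvOffsets mj (0 + s0 * mj) srest).drop 1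
          = pvOffsets mj (0 + s0 * mj) srest := rfl
      -- rewrite A's result via map_offsets_eq_backfill
      set Z := List.zipWith (fun a o => a - o) arest (pvOffsets mj (0 + s0 * mj) srest) with hZ
      have hAt : (if Z.foldl max (a0 - 0) < 0 then 0 else Z.foldl max (a0 - 0))
          = Z.foldl max (max (a0 - 0) 0) := by
        rw [max_comm, foldl_max_max]
        rcases le_or_gt 0 (Z.foldl max (a0 - 0)) with h | h
        · rw [if_neg (by omega), max_eq_right h]
        · rw [if_pos h, max_eq_left h.le]
      rw [hAt]
      have hA : (pvOffsets mj (0 + s0 * mj) srest).map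
            (fun o => Z.foldl max (max (a0 - 0) 0) + o)
          = pvBackfill mj (Z.foldl max (max (a0 - 0) 0) + (0 + s0 * mj) + srest.sum * mj) srest :=
        map_offsets_eq_backfill mj _ (0 + s0 * mj) srest
      -- B's fin via forward_sweep with a = 0
      have hlen' : ((a0 :: arest).drop 1).length + 1 = (s0 :: srest).length := by
        simp only [List.drop_one, List.tail_cons, List.length_cons] at hlen ⊢; omega
      have hB := forward_sweep mj (s0 :: srest) (by simp) ((a0 :: arest).drop 1) hlen'
        (max ((a0 :: arest).headD 0) 0) 0
      simp only [List.drop_one, List.tail_cons, List.headD_cons] at hB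
      have hoffdrop : (pvOffsets mj 0 (s0 :: srest)).tail
          = pvOffsets mj (0 + s0 * mj) srest := by rw [hoffs]; rfl
      rw [hoffdrop] at hB
      have hskdrop : (s0 :: srest).drop 1 = srest := rfl
      rw [hdrop1, hskdrop, hA]
      congr 1
      simp only [List.drop_one, List.tail_cons, List.headD_cons]
      rw [hB]
      have hsum : (s0 :: srest).sum = s0 + srest.sum := by simp
      rw [hsum, ← hZ]
      have : max a0 0 - 0 = max (a0 - 0) 0 := by omega
      rw [this]
      ring

-- the two folds over mana agree (with the length invariant carried along)
theorem fold_eq (skill : List Int) (hne : skill ≠ []) (mana : List Int) :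
    ∀ (avail : List Int), avail.length = skill.length →
    (mana.foldl (fun avail mj =>
        let offsets := pvOffsets mj 0 skill
        let t := (PySem.List.max? (List.zipWith (fun a o => a - o) avail offsets) (fun y => y)).getD 0
        let t := if t < 0 then 0 else t
        (offsets.drop 1).map (fun o => t + o)) avail)
      = (mana.foldl (fun done x =>
          let cur := (List.zip skill.dropLast (done.drop 1)).foldl
            (fun cur sd => max (cur + sd.1 * x) sd.2) (max (done.headD 0) 0)
          let fin := cur + (PySem.List.pyGet? skill (-1)).getD 0 * x
          pvBackfill x fin (skill.drop 1)) avail) := by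
  induction mana with
  | nil => intro avail _; rfl
  | cons mj rest ih =>
    intro avail hlen
    rw [List.foldl_cons, List.foldl_cons, step_eq skill hne mj avail hlen]
    apply ih
    rw [pvBackfill_length]
    cases skill with
    | nil => exact absurd rfl hne
    | cons s sr => simp

-- ===== VERDICT (by name: the statement is the Claim_ definition above) =====
theorem minTimeToBrewPotions_spec : Claim_equal_minTimeToBrewPotions := by
  intro skill mana _ hpre
  unfold Spec_minTimeToBrewPotions minTimeToBrewPotions minTimeToBrewPotions_alt
  simp only []
  rw [fold_eq skill hpre mana (List.replicate skill.length 0) (by simp)]
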